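-- pv_equiv track=rewrite | github.com/itayamzaleg1/delivery-ocr | parse_delivery_addresses.py | remove_duplicate_word_pairs
-- ===== SOURCE A (Python) =====
-- def remove_duplicate_word_pairs(text):
--     words = text.split()
--     result = []
--     i = 0
--     while i < len(words):
--         if i + 3 < len(words) and words[i] == words[i+2] and words[i+1] == words[i+3]:
--             result.append(words[i])
--             result.append(words[i+1])
--             i += 4
--         else:
--             result.append(words[i])
--             i += 1
--     return " ".join(result)
-- ===== SOURCE B (Python) =====
-- def remove_duplicate_word_pairs(text):
--     # One-pass streaming scan: consume the words through an iterator into a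
--     # 4-word lookahead buffer; flush a pair when the buffer holds a repeated
--     # word pair, otherwise shift one word out.
--     out = []
--     buf = []
--     words = iter(text.split())
--     while True:
--         for w in words:
--             buf.append(w)
--             if len(buf) == 4:
--                 break
--         if not buf:
--             break
--         if len(buf) == 4 and buf[0] == buf[2] and buf[1] == buf[3]:
--             out.append(buf[0])
--             out.append(buf[1])
--             buf = []
--         else:
--             out.append(buf.pop(0))
--     return " ".join(out)
-- ===== Notes on version B (the rewrite author's own statement) =====
-- stated objective: alternative
-- what changed: Replaces A's index-arithmetic while loop over the word array (advance by 4 on a match, by 1 otherwise) with a one-pass streaming scan that pulls words from an iterator into a 4-word lookahead buffer, flushing the pair or shifting one word out.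
import Mathlib
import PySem

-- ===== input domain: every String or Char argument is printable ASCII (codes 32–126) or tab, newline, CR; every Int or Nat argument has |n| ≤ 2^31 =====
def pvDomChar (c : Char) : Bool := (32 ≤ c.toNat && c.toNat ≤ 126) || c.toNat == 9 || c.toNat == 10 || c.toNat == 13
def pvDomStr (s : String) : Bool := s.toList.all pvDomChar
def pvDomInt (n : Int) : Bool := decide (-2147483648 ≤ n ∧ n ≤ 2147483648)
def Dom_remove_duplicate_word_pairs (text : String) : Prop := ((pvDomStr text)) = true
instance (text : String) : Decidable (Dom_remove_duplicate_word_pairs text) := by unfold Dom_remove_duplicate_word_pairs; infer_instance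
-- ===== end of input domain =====

-- B replaces A's index-arithmetic scan by a one-pass streaming scan with a 4-word
-- lookahead buffer (objective: alternative, same O(n) cost).

-- ===== PORT A =====
-- A's while loop: index i over words, advance by 4 on a duplicated pair, else by 1.
def pvLoopA (words : List String) (i : Nat) (result : List String) : List String :=
  if _h : i < words.length then
    if i + 3 < words.length ∧ words.getD i "" = words.getD (i+2) ""
        ∧ words.getD (i+1) "" = words.getD (i+3) "" then
      pvLoopA words (i+4) (result ++ [words.getD i "", words.getD (i+1) ""])
    else
      pvLoopA words (i+1) (result ++ [words.getD i ""])
  else result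
termination_by words.length - i

def remove_duplicate_word_pairs (text : String) : String :=
  PySem.Str.join " " (pvLoopA (PySem.Str.split₀ text) 0 [])

-- ===== PORT B =====
-- B's while True loop: refill the buffer to 4 words from the stream, flush a pair or shift one.
def pvLoopB (rest buf out : List String) : List String :=
  let buf2 := buf ++ rest.take (4 - buf.length)
  let rest2 := rest.drop (4 - buf.length)
  if hne : buf2.isEmpty then out
  else if h4 : buf2.length = 4 ∧ buf2.getD 0 "" = buf2.getD 2 ""
      ∧ buf2.getD 1 "" = buf2.getD 3 "" then
    pvLoopB rest2 [] (out ++ [buf2.getD 0 "", buf2.getD 1 ""])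
  else
    pvLoopB rest2 buf2.tail (out ++ [buf2.getD 0 ""])
termination_by rest.length + buf.length
decreasing_by
  · obtain ⟨hl, -, -⟩ := h4
    simp only [buf2, List.length_append, List.length_take] at hl
    simp only [List.length_drop, List.length_nil]
    omega
  · have hpos : 0 < buf2.length := by
      cases hB : buf2 with
      | nil => rw [hB] at hne; simp at hne
      | cons x xs => simp
    simp only [buf2, List.length_append, List.length_take] at hpos
    simp only [List.length_tail, List.length_drop, List.length_append, List.length_take]
    omega

def remove_duplicate_word_pairs_alt (text : String) : String :=
  PySem.Str.join " " (pvLoopB (PySem.Str.split₀ text) [] [])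

-- ===== PRECONDITION & SPEC =====
def Spec_remove_duplicate_word_pairs (text : String) (out : String) : Prop := out = remove_duplicate_word_pairs_alt text
instance (text : String) (out : String) : Decidable (Spec_remove_duplicate_word_pairs text out) := by unfold Spec_remove_duplicate_word_pairs; infer_instance

-- ===== CLAIM (what is proved, stated in full; the proofs are below) =====
def Claim_equal_remove_duplicate_word_pairs : Prop := ∀ (text : String), Dom_remove_duplicate_word_pairs text → Spec_remove_duplicate_word_pairs text (remove_duplicate_word_pairs text)

-- ===== LEMMAS AND PROOFS =====

-- Common characterisation of both loops: the collapsed word list.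
def pvCore : List String → List String
  | a :: b :: c :: d :: t =>
    if a = c ∧ b = d then a :: b :: pvCore t else a :: pvCore (b :: c :: d :: t)
  | a :: t => a :: pvCore t
  | [] => []
termination_by l => l.length

lemma pvLoopA_eq (ws : List String) :
    ∀ n i out, ws.length - i ≤ n → pvLoopA ws i out = out ++ pvCore (ws.drop i) := by
  intro n
  induction n with
  | zero =>
    intro i out hn
    rw [pvLoopA]
    have hge : ws.length ≤ i := by omega
    rw [dif_neg (by omega), List.drop_eq_nil_of_le hge]
    simp [pvCore]
  | succ n ih =>
    intro i out hn
    rw [pvLoopA]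
    by_cases h : i < ws.length
    · rw [dif_pos h]
      have e1 : ws.drop i = ws[i] :: ws.drop (i+1) := List.drop_eq_getElem_cons h
      by_cases hc : i + 3 < ws.length ∧ ws.getD i "" = ws.getD (i+2) ""
          ∧ ws.getD (i+1) "" = ws.getD (i+3) ""
      · rw [if_pos hc]
        obtain ⟨hlen, hac, hbd⟩ := hc
        have e2 : ws.drop (i+1) = ws[i+1] :: ws.drop (i+2) := List.drop_eq_getElem_cons (by omega)
        have e3 : ws.drop (i+2) = ws[i+2] :: ws.drop (i+3) := List.drop_eq_getElem_cons (by omega)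
        have e4 : ws.drop (i+3) = ws[i+3] :: ws.drop (i+4) := List.drop_eq_getElem_cons (by omega)
        rw [ih (i+4) _ (by omega)]
        rw [e1, e2, e3, e4, pvCore]
        rw [List.getD_eq_getElem ws "" h, List.getD_eq_getElem ws "" (show i+2 < ws.length by omega)] at hac
        rw [List.getD_eq_getElem ws "" (show i+1 < ws.length by omega),
          List.getD_eq_getElem ws "" (show i+3 < ws.length by omega)] at hbd
        rw [if_pos ⟨hac, hbd⟩]
        rw [List.getD_eq_getElem ws "" h, List.getD_eq_getElem ws "" (show i+1 < ws.length by omega)]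
        simp
      · rw [if_neg hc]
        rw [ih (i+1) _ (by omega)]
        have hhead : pvCore (ws.drop i) = ws[i] :: pvCore (ws.drop (i+1)) := by
          by_cases hlen : i + 3 < ws.length
          · have e2 : ws.drop (i+1) = ws[i+1] :: ws.drop (i+2) := List.drop_eq_getElem_cons (by omega)
            have e3 : ws.drop (i+2) = ws[i+2] :: ws.drop (i+3) := List.drop_eq_getElem_cons (by omega)
            have e4 : ws.drop (i+3) = ws[i+3] :: ws.drop (i+4) := List.drop_eq_getElem_cons (by omega)
            have hne : ¬ (ws[i] = ws[i+2] ∧ ws[i+1] = ws[i+3]) := by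
              intro ⟨h1, h2⟩
              apply hc
              refine ⟨hlen, ?_, ?_⟩
              · rw [List.getD_eq_getElem ws "" h,
                  List.getD_eq_getElem ws "" (show i+2 < ws.length by omega)]; exact h1
              · rw [List.getD_eq_getElem ws "" (show i+1 < ws.length by omega),
                  List.getD_eq_getElem ws "" (show i+3 < ws.length by omega)]; exact h2
            rw [e1, e2, e3, e4, pvCore, if_neg hne, ← e4, ← e3, ← e2]
          · -- fewer than 4 words remain from i
            have hlt : (ws.drop (i+1)).length ≤ 2 := by
              simp only [List.length_drop]; omega
            rw [e1]
            rcases hd : ws.drop (i+1) with _ | ⟨b, _ | ⟨c, _ | ⟨d, t⟩⟩⟩ <;>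
              simp_all [pvCore]
        rw [hhead]
        rw [List.getD_eq_getElem ws "" h]
        simp
    · rw [dif_neg h]
      rw [List.drop_eq_nil_of_le (by omega)]
      simp [pvCore]

lemma pvLoopB_eq :
    ∀ n rest buf out, rest.length + buf.length ≤ n → buf.length ≤ 4 →
      pvLoopB rest buf out = out ++ pvCore (buf ++ rest) := by
  intro n
  induction n with
  | zero =>
    intro rest buf out hn hb
    have h1 : rest = [] := by cases rest <;> simp_all
    have h2 : buf = [] := by cases buf <;> simp_all
    subst h1; subst h2
    rw [pvLoopB]; simp [pvCore]
  | succ n ih =>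
    intro rest buf out hn hb
    rw [pvLoopB]
    have htake : buf ++ rest.take (4 - buf.length) = (buf ++ rest).take 4 := by
      rw [List.take_append]
      rw [List.take_of_length_le hb]
    have hdrop : rest.drop (4 - buf.length) = (buf ++ rest).drop 4 := by
      rw [List.drop_append]
      rw [List.drop_eq_nil_of_le hb, List.nil_append]
    simp only [htake, hdrop]
    rcases hs : buf ++ rest with _ | ⟨a, _ | ⟨b, _ | ⟨c, _ | ⟨d, t⟩⟩⟩⟩
    · simp [pvCore]
    · have hL : rest.length + buf.length = 1 := by
        have := congrArg List.length hs; simp at this; omega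
      rw [dif_neg (by simp), dif_neg (by simp)]
      rw [ih _ _ _ (by simp) (by simp)]
      simp [pvCore]
    · have hL : rest.length + buf.length = 2 := by
        have := congrArg List.length hs; simp at this; omega
      rw [dif_neg (by simp), dif_neg (by simp)]
      rw [ih _ _ _ (by simp; all_goals omega) (by simp)]
      simp [pvCore]
    · have hL : rest.length + buf.length = 3 := by
        have := congrArg List.length hs; simp at this; omega
      rw [dif_neg (by simp), dif_neg (by simp)]
      rw [ih _ _ _ (by simp; all_goals omega) (by simp)]
      simp [pvCore]
    · have hL : rest.length + buf.length = 4 + t.length := by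
        have := congrArg List.length hs; simp at this; omega
      rw [dif_neg (by simp)]
      by_cases hc : a = c ∧ b = d
      · rw [dif_pos (by simp [hc.1, hc.2])]
        rw [ih _ _ _ (by simp; all_goals omega) (by simp)]
        simp [pvCore, hc.1, hc.2]
      · rw [dif_neg (by simpa using hc)]
        rw [ih _ _ _ (by simp; all_goals omega) (by simp)]
        rw [pvCore, if_neg hc]
        simp
-- ===== VERDICT (by name: the statement is the Claim_ definition above) =====
theorem remove_duplicate_word_pairs_spec : Claim_equal_remove_duplicate_word_pairs := by
  intro text _
  unfold Spec_remove_duplicate_word_pairs remove_duplicate_word_pairs remove_duplicate_word_pairs_alt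
  rw [pvLoopA_eq _ (PySem.Str.split₀ text).length 0 [] (by omega),
    pvLoopB_eq ((PySem.Str.split₀ text).length + 0) _ _ _ (by simp) (by simp)]
  simp
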